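-- pv_equiv track=rewrite | github.com/edyhvh/davar | data/dict/lexicon/lexicon_builder.py | determine_sources
-- ===== SOURCE A (Python) =====
-- from typing import Dict, List, Optional
--
-- def determine_sources(definitions: list) -> Dict[str, bool]:
--     """Determine which sources are available"""
--     sources = {"strongs": False, "bdb": False}
--     for defn in definitions:
--         source = defn.get('source', '')
--         if source == 'bdb':
--             sources['bdb'] = True
--         elif source in ['strongs', 'strongs_kjv']:
--             sources['strongs'] = True
--     return sources
-- ===== SOURCE B (Python) =====
-- def determine_sources(definitions: list) -> dict:
--     """Determine which sources are available"""
--     return {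
--         "strongs": any(d.get('source', '') in ('strongs', 'strongs_kjv') for d in definitions),
--         "bdb": any(d.get('source', '') == 'bdb' for d in definitions),
--     }
-- ===== Notes on version B (the rewrite author's own statement) =====
-- stated objective: idiomatic
-- what changed: Replaces A's single pass that mutates a flag dict with two independent short-circuiting any() queries, one per source, building the result dict in one expression with no mutable state.
import Mathlib
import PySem

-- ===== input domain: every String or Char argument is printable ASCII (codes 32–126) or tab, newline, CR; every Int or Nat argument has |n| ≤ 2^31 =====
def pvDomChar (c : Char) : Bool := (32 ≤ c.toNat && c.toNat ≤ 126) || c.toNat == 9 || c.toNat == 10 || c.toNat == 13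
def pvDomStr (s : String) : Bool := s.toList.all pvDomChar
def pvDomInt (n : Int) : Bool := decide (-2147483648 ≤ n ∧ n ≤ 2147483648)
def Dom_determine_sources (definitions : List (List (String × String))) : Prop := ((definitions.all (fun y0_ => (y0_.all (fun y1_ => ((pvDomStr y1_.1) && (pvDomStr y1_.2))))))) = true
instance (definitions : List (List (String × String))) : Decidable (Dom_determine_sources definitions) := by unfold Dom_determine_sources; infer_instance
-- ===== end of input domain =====

-- B replaces A's flag-mutating single pass with two independent short-circuiting any() queries; objective: idiomatic.

-- ===== PORT A =====
-- loop body of A, named (literal: defn.get('source',''); the if/elif chain; else leave sources unchanged)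
def detStep (sources : PySem.Dict String Bool) (defn : List (String × String)) : PySem.Dict String Bool :=
  let source := PySem.Dict.getD (PySem.Dict.mk defn) "source" ""
  if source == "bdb" then sources.insert "bdb" true
  else if source == "strongs" || source == "strongs_kjv" then sources.insert "strongs" true
  else sources

def determine_sources (definitions : List (List (String × String))) : List (String × Bool) :=
  -- sources = {"strongs": False, "bdb": False}; for defn in definitions: …; return sources
  (definitions.foldl detStep (PySem.Dict.mk [("strongs", false), ("bdb", false)])).items

-- ===== PORT B =====
def determine_sources_alt (definitions : List (List (String × String))) : List (String × Bool) :=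
  -- any(d.get('source','') in ('strongs','strongs_kjv') …) and any(d.get('source','') == 'bdb' …);
  -- List.any is short-circuiting, matching Python's any over a generator
  [("strongs", definitions.any (fun d =>
      let s := PySem.Dict.getD (PySem.Dict.mk d) "source" ""
      s == "strongs" || s == "strongs_kjv")),
   ("bdb", definitions.any (fun d => PySem.Dict.getD (PySem.Dict.mk d) "source" "" == "bdb"))]

-- ===== PRECONDITION & SPEC =====
def Spec_determine_sources (definitions : List (List (String × String))) (out : List (String × Bool)) : Prop := out = determine_sources_alt definitions
instance (definitions : List (List (String × String))) (out : List (String × Bool)) : Decidable (Spec_determine_sources definitions out) := by unfold Spec_determine_sources; infer_instance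

-- ===== CLAIM (what is proved, stated in full; the proofs are below) =====
def Claim_equal_determine_sources : Prop := ∀ (definitions : List (List (String × String))), Dom_determine_sources definitions → Spec_determine_sources definitions (determine_sources definitions)

-- ===== LEMMAS AND PROOFS =====

theorem loop_main (defs : List (List (String × String))) (s b : Bool) :
    defs.foldl detStep (PySem.Dict.mk [("strongs", s), ("bdb", b)])
    = PySem.Dict.mk
        [("strongs", s || defs.any (fun d =>
            PySem.Dict.getD (PySem.Dict.mk d) "source" "" == "strongs"
              || PySem.Dict.getD (PySem.Dict.mk d) "source" "" == "strongs_kjv")),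
         ("bdb", b || defs.any (fun d => PySem.Dict.getD (PySem.Dict.mk d) "source" "" == "bdb"))] := by
  induction defs generalizing s b with
  | nil => simp
  | cons d ds ih =>
    rw [List.foldl_cons, List.any_cons, List.any_cons]
    by_cases hb : PySem.Dict.getD (PySem.Dict.mk d) "source" "" = "bdb"
    · rw [hb,
        show detStep (PySem.Dict.mk [("strongs", s), ("bdb", b)]) d
            = PySem.Dict.mk [("strongs", s), ("bdb", true)] from by unfold detStep; rw [hb]; rfl,
        ih]
      simp
    · by_cases hs : PySem.Dict.getD (PySem.Dict.mk d) "source" "" = "strongs"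
      · rw [hs,
          show detStep (PySem.Dict.mk [("strongs", s), ("bdb", b)]) d
              = PySem.Dict.mk [("strongs", true), ("bdb", b)] from by unfold detStep; rw [hs]; rfl,
          ih]
        simp
      · by_cases hk : PySem.Dict.getD (PySem.Dict.mk d) "source" "" = "strongs_kjv"
        · rw [hk,
            show detStep (PySem.Dict.mk [("strongs", s), ("bdb", b)]) d
                = PySem.Dict.mk [("strongs", true), ("bdb", b)] from by unfold detStep; rw [hk]; rfl,
            ih]
          simp
        · have h1 : (PySem.Dict.getD (PySem.Dict.mk d) "source" "" == "bdb") = false := by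
            simpa using hb
          have h2 : (PySem.Dict.getD (PySem.Dict.mk d) "source" "" == "strongs") = false := by
            simpa using hs
          have h3 : (PySem.Dict.getD (PySem.Dict.mk d) "source" "" == "strongs_kjv") = false := by
            simpa using hk
          rw [h1, h2, h3,
            show detStep (PySem.Dict.mk [("strongs", s), ("bdb", b)]) d
                = PySem.Dict.mk [("strongs", s), ("bdb", b)] from by
              unfold detStep; simp [h1, h2, h3],
            ih]
          simp

-- ===== VERDICT (by name: the statement is the Claim_ definition above) =====
theorem determine_sources_spec : Claim_equal_determine_sources := by
  intro definitions _
  unfold Spec_determine_sources determine_sources determine_sources_alt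
  rw [loop_main]
  simp
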